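-- pv_equiv track=rewrite | github.com/Gadisa21/Competitive_Programming | leetcode/Minimum-Adjacent-Swaps-to-Reach-the-Kth-Smallest-Number.py | getMinSwaps
-- ===== SOURCE A (Python) =====
-- def getMinSwaps(num: str, k: int) -> int:
--     num_list = list(num)
--
--     def next_permutation(arr):
--         i = len(arr) - 2
--         while i >= 0 and arr[i] >= arr[i + 1]:
--             i -= 1
--         if i == -1:
--             return False
--         j = len(arr) - 1
--         while arr[j] <= arr[i]:
--             j -= 1
--         arr[i], arr[j] = arr[j], arr[i]
--         arr[i + 1:] = reversed(arr[i + 1:])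
--         return True
--
--     for _ in range(k):
--         next_permutation(num_list)
--
--     kth_permutation = ''.join(num_list)
--
--     num_list = list(num)
--     kth_list = list(kth_permutation)
--
--     swaps = 0
--     for i in range(len(num_list)):
--         if num_list[i] != kth_list[i]:
--             j = i
--             while num_list[j] != kth_list[i]:
--                 j += 1
--
--             while j > i:
--                 num_list[j], num_list[j - 1] = num_list[j - 1], num_list[j]
--                 swaps += 1
--                 j -= 1
--
--     return swaps
-- ===== SOURCE B (Python) =====
-- def getMinSwaps(num: str, k: int) -> int:
--     def _advance(arr):
--         # replace arr's suffix with its next lexicographic permutation; False if arr is the last one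
--         p = len(arr) - 2
--         while p >= 0 and arr[p] >= arr[p + 1]:
--             p -= 1
--         if p < 0:
--             return False
--         j = len(arr) - 1
--         while arr[j] <= arr[p]:
--             j -= 1
--         arr[p:] = [arr[j]] + (arr[p + 1:j] + [arr[p]] + arr[j + 1:])[::-1]
--         return True
--
--     arr = list(num)
--     steps = k
--     while steps > 0 and _advance(arr):
--         steps -= 1
--
--     # count adjacent swaps: skip the common prefix, then greedy leftmost match via index/pop
--     src = list(num)
--     m = 0
--     while m < len(arr) and src[m] == arr[m]:
--         m += 1
--     rem = src[m:]
--     total = 0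
--     for c in arr[m:]:
--         idx = rem.index(c)
--         total += idx
--         rem.pop(idx)
--     return total
-- ===== Notes on version B (the rewrite author's own statement) =====
-- stated objective: faster
-- what changed: B exits the k-step next-permutation loop as soon as the last permutation is reached (A keeps calling next_permutation k times even when it is a no-op), rebuilds the changed suffix from slices instead of in-place swap+reversal, and counts the swaps by stripping the common prefix and summing rem.index(c)+pop (greedy leftmost match) instead of simulating every adjacent swap with an inner bubble loop.
-- outside the precondition, e.g. on getMinSwaps('', 1): A raises IndexError, B returns 0
-- crash fix: On num = '' with k > 0, A raises IndexError (next_permutation evaluates arr[-1] on an empty list); B returns 0. — e.g. on getMinSwaps("", 1): A raises IndexError, B returns 0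
import Mathlib
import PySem

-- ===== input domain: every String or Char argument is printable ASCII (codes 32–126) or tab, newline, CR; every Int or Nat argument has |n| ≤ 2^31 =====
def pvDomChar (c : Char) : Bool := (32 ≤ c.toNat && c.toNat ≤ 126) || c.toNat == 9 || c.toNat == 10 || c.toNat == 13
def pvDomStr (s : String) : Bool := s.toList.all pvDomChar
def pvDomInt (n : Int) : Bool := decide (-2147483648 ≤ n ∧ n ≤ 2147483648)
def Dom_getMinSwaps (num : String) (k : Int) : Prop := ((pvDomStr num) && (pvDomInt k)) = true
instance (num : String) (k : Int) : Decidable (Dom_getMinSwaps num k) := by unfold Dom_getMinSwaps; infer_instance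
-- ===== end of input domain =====

-- B replaces A's bubble-shift swap counting by a prefix-strip + index/pop greedy count and
-- stops the k-fold next-permutation loop as soon as the last permutation is reached
-- (objective: faster — a timing run measured the early exit's payoff when k exceeds the
-- permutations left; A keeps scanning k times even when next_permutation is a no-op).

-- ===== PORT A =====

-- while i >= 0 and arr[i] >= arr[i+1]: i -= 1
def pivotA (arr : List Char) (i : Int) : Int :=
  if h : 0 ≤ i ∧ PySem.List.pyGetD arr (i + 1) ' ' ≤ PySem.List.pyGetD arr i ' ' then
    pivotA arr (i - 1)
  else i
termination_by (i + 1).toNat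
decreasing_by omega

-- while arr[j] <= arr[i]: j -= 1   (the 0 ≤ j conjunct is for termination only: Python has no
-- guard, but the scan always stops at j ≥ i+1 because arr[i] < arr[i+1])
def jScanA (arr : List Char) (p : Int) (j : Int) : Int :=
  if h : 0 ≤ j ∧ PySem.List.pyGetD arr j ' ' ≤ PySem.List.pyGetD arr p ' ' then
    jScanA arr p (j - 1)
  else j
termination_by (j + 1).toNat
decreasing_by omega

-- next_permutation(arr): A mutates arr in place and returns a bool the caller ignores;
-- the port returns the mutated list (unchanged when the scan finds no pivot).
def nextPermA (arr : List Char) : List Char :=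
  let i := pivotA arr ((arr.length : Int) - 2)
  if i = -1 then arr
  else if 0 ≤ i then
    let j := jScanA arr i ((arr.length : Int) - 1)
    -- arr[i], arr[j] = arr[j], arr[i]
    let arr2 := PySem.List.pySetD (PySem.List.pySetD arr i (PySem.List.pyGetD arr j ' ')) j
                  (PySem.List.pyGetD arr i ' ')
    -- arr[i+1:] = reversed(arr[i+1:])
    PySem.List.slice arr2 none (some (i + 1)) ++ (PySem.List.slice arr2 (some (i + 1)) none).reverse
  else arr  -- only arr = [] (i = -2): Python raises IndexError there (outside Pre_)

-- for _ in range(k): next_permutation(num_list)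
def stepsA : Nat → List Char → List Char
  | 0, arr => arr
  | n + 1, arr => stepsA n (nextPermA arr)

-- while num_list[j] != kth_list[i]: j += 1   (falls off the end only if the char is absent,
-- where Python raises IndexError — unreachable: kth_list is a permutation of num_list)
def countFindA (s : List Char) (c : Char) (j : Nat) : Nat :=
  if h : j < s.length then (if s[j] = c then j else countFindA s c (j + 1)) else j
termination_by s.length - j
decreasing_by omega

-- while j > i: num_list[j], num_list[j-1] = num_list[j-1], num_list[j]; swaps += 1; j -= 1
def bubbleA (i : Nat) : Nat → List Char → Int → List Char × Int
  | j, s, swaps =>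
    if h : i < j then
      bubbleA i (j - 1) ((s.set j (s.getD (j - 1) ' ')).set (j - 1) (s.getD j ' ')) (swaps + 1)
    else (s, swaps)
termination_by j => j
decreasing_by omega

-- for i in range(len(num_list)): …   (fuel = len - i; all indices are nonnegative and in range)
def countA (kth : List Char) : Nat → List Char → Nat → Int → Int
  | 0, _, _, swaps => swaps
  | fuel + 1, s, i, swaps =>
    if s.getD i ' ' ≠ kth.getD i ' ' then
      let j := countFindA s (kth.getD i ' ') i
      let r := bubbleA i j s swaps
      countA kth fuel r.1 (i + 1) r.2
    else countA kth fuel s (i + 1) swaps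

def getMinSwaps (num : String) (k : Int) : Int :=
  let numList := num.toList
  let kthPermutation := String.ofList (stepsA k.toNat numList)   -- ''.join(num_list)
  let kthList := kthPermutation.toList
  countA kthList numList.length numList 0 0

-- ===== PORT B =====

-- while p >= 0 and arr[p] >= arr[p+1]: p -= 1
def pivotB (arr : List Char) (p : Int) : Int :=
  if h : 0 ≤ p ∧ PySem.List.pyGetD arr (p + 1) ' ' ≤ PySem.List.pyGetD arr p ' ' then
    pivotB arr (p - 1)
  else p
termination_by (p + 1).toNat
decreasing_by omega

-- while arr[j] <= arr[p]: j -= 1   (0 ≤ j conjunct for termination only, as in A's port)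
def jScanB (arr : List Char) (p : Int) (j : Int) : Int :=
  if h : 0 ≤ j ∧ PySem.List.pyGetD arr j ' ' ≤ PySem.List.pyGetD arr p ' ' then
    jScanB arr p (j - 1)
  else j
termination_by (j + 1).toNat
decreasing_by omega

-- _advance(arr): none = False; some = the list after arr[p:] = [arr[j]] + (…)[::-1]
def advB (arr : List Char) : Option (List Char) :=
  let p := pivotB arr ((arr.length : Int) - 2)
  if p < 0 then none
  else
    let j := jScanB arr p ((arr.length : Int) - 1)
    some (PySem.List.slice arr none (some p) ++ [PySem.List.pyGetD arr j ' ']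
          ++ (PySem.List.slice arr (some (p + 1)) (some j) ++ [PySem.List.pyGetD arr p ' ']
              ++ PySem.List.slice arr (some (j + 1)) none).reverse)   -- [::-1] is reverse

-- while steps > 0 and _advance(arr): steps -= 1
def stepsB : Nat → List Char → List Char
  | 0, arr => arr
  | n + 1, arr => match advB arr with | none => arr | some a => stepsB n a

-- while m < len(arr) and src[m] == arr[m]: m += 1
def prefLenB (src arr : List Char) (m : Nat) : Nat :=
  if h : m < arr.length ∧ src.getD m ' ' = arr.getD m ' ' then prefLenB src arr (m + 1) else m
termination_by arr.length - m
decreasing_by omega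

-- for c in arr[m:]: idx = rem.index(c); total += idx; rem.pop(idx)
-- (rem.index raises ValueError only if c is absent — unreachable: arr is a permutation of src)
def countB : List Char → List Char → Int
  | _, [] => 0
  | rem, c :: rest =>
    match PySem.List.index? rem c with
    | some idx => (idx : Int) + countB (rem.eraseIdx idx) rest
    | none => countB rem rest

def getMinSwaps_alt (num : String) (k : Int) : Int :=
  let arr := stepsB k.toNat num.toList
  let src := num.toList
  let m := prefLenB src arr 0
  countB (src.drop m) (arr.drop m)

-- ===== PRECONDITION & SPEC =====
-- Pre_ excludes only num = "" with k > 0: there A's next_permutation evaluates arr[-1] on an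
-- empty list and raises IndexError.
def Pre_getMinSwaps (num : String) (k : Int) : Prop := num.toList ≠ [] ∨ k ≤ 0
instance (num : String) (k : Int) : Decidable (Pre_getMinSwaps num k) := by
  unfold Pre_getMinSwaps; infer_instance

def pvWitness_getMinSwaps : String × Int := ("1320", 3)

-- On num = "" with k > 0, A raises IndexError; B returns 0 (the empty string needs no swaps).
def Raises_getMinSwaps (num : String) (k : Int) : Prop := num.toList = [] ∧ 0 < k
instance (num : String) (k : Int) : Decidable (Raises_getMinSwaps num k) := by
  unfold Raises_getMinSwaps; infer_instance
def pvRaiseWitness_getMinSwaps : String × Int := ("", 1)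
def pvRaiseWitnessOut_getMinSwaps : Int := 0

def Spec_getMinSwaps (num : String) (k : Int) (out : Int) : Prop := out = getMinSwaps_alt num k
instance (num : String) (k : Int) (out : Int) : Decidable (Spec_getMinSwaps num k out) := by
  unfold Spec_getMinSwaps; infer_instance

-- ===== CLAIM (what is proved, stated in full; the proofs are below) =====
def Claim_equal_getMinSwaps : Prop := ∀ (num : String) (k : Int), Dom_getMinSwaps num k →
  Pre_getMinSwaps num k → Spec_getMinSwaps num k (getMinSwaps num k)

def Claim_raises_getMinSwaps : Prop :=
  (∀ (num : String) (k : Int), Dom_getMinSwaps num k → Raises_getMinSwaps num k →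
    ¬ Pre_getMinSwaps num k) ∧
  (Dom_getMinSwaps (pvRaiseWitness_getMinSwaps.1) (pvRaiseWitness_getMinSwaps.2) ∧
   Raises_getMinSwaps (pvRaiseWitness_getMinSwaps.1) (pvRaiseWitness_getMinSwaps.2) ∧
   getMinSwaps_alt (pvRaiseWitness_getMinSwaps.1) (pvRaiseWitness_getMinSwaps.2) =
     pvRaiseWitnessOut_getMinSwaps)

-- ===== LEMMAS AND PROOFS =====

-- The two pivot scans are the same recursion.
theorem pivotB_eq_pivotA (arr : List Char) (i : Int) : pivotB arr i = pivotA arr i := by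
  by_cases h : 0 ≤ i
  · induction hn : (i+1).toNat generalizing i with
    | zero => omega
    | succ n ih =>
      rw [pivotB, pivotA]
      split_ifs with hc
      · by_cases h0 : 0 ≤ i - 1
        · exact ih (i-1) h0 (by omega)
        · rw [pivotB, pivotA]; split_ifs with hd
          · exact absurd hd.1 (by omega)
          · rfl
      · rfl
  · rw [pivotB, pivotA]; split_ifs with hd
    · exact absurd hd.1 h
    · rfl

theorem jScanB_eq_jScanA (arr : List Char) (p j : Int) : jScanB arr p j = jScanA arr p j := by
  by_cases h : 0 ≤ j
  · induction hn : (j+1).toNat generalizing j with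
    | zero => omega
    | succ n ih =>
      rw [jScanB, jScanA]
      split_ifs with hc
      · by_cases h0 : 0 ≤ j - 1
        · exact ih (j-1) h0 (by omega)
        · rw [jScanB, jScanA]; split_ifs with hd
          · exact absurd hd.1 (by omega)
          · rfl
      · rfl
  · rw [jScanB, jScanA]; split_ifs with hd
    · exact absurd hd.1 h
    · rfl

-- the pivot scan returns a position ≤ its start, and a strict ascent when nonnegative
theorem pivotA_spec (arr : List Char) (i : Int) :
    pivotA arr i ≤ i ∧ (0 ≤ pivotA arr i →
      PySem.List.pyGetD arr (pivotA arr i) ' ' < PySem.List.pyGetD arr (pivotA arr i + 1) ' ') := by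
  by_cases h : 0 ≤ i
  · induction hn : (i+1).toNat generalizing i with
    | zero => omega
    | succ n ih =>
      rw [pivotA]
      split_ifs with hc
      · by_cases h0 : 0 ≤ i - 1
        · have := ih (i-1) h0 (by omega); exact ⟨by omega, this.2⟩
        · rw [pivotA]; split_ifs with hd
          · exact absurd hd.1 (by omega)
          · exact ⟨by omega, fun h1 => absurd h1 (by omega)⟩
      · exact ⟨le_refl _, fun h0 => lt_of_not_ge (fun hge => hc ⟨h0, hge⟩)⟩
  · rw [pivotA]; split_ifs with hd
    · exact absurd hd.1 h
    · exact ⟨le_refl _, fun h0 => absurd h0 h⟩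

-- the j scan stays right of the pivot and lands on an element above it
theorem jScanA_spec (arr : List Char) (p : Int) : ∀ (j : Int), 0 ≤ p → p + 1 ≤ j →
    PySem.List.pyGetD arr p ' ' < PySem.List.pyGetD arr (p + 1) ' ' →
    p + 1 ≤ jScanA arr p j ∧ jScanA arr p j ≤ j ∧
      PySem.List.pyGetD arr p ' ' < PySem.List.pyGetD arr (jScanA arr p j) ' ' := by
  intro j
  induction hn : (j+1).toNat generalizing j with
  | zero => intro hp hj _; omega
  | succ n ih =>
    intro hp hj hlt
    rw [jScanA]
    split_ifs with hc
    · have hne : j ≠ p + 1 := by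
        intro he; rw [he] at hc; exact absurd hc.2 (not_le_of_gt hlt)
      have := ih (j-1) (by omega) hp (by omega) hlt
      exact ⟨this.1, by omega, this.2.2⟩
    · have h0j : 0 ≤ j := by omega
      exact ⟨hj, le_refl _, lt_of_not_ge (fun hge => hc ⟨h0j, hge⟩)⟩

-- split a list at two positions p < j
theorem decompTwo (arr : List Char) (pn jn : Nat) (hpj : pn < jn) (hjn : jn < arr.length) :
    ∃ u v w, arr = u ++ arr.getD pn ' ' :: (v ++ arr.getD jn ' ' :: w) ∧
      u.length = pn ∧ v.length = jn - (pn + 1) := by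
  refine ⟨arr.take pn, (arr.drop (pn+1)).take (jn - (pn+1)), arr.drop (jn+1), ?_, ?_, ?_⟩
  · have h1 : pn < arr.length := by omega
    have hd1 : arr.drop pn = arr[pn] :: arr.drop (pn+1) := List.drop_eq_getElem_cons h1
    have hd2 : arr.drop jn = arr[jn] :: arr.drop (jn+1) := List.drop_eq_getElem_cons hjn
    have hdd : (arr.drop (pn+1)).drop (jn - (pn+1)) = arr.drop jn := by
      rw [List.drop_drop]; congr 1; omega
    conv_lhs => rw [← List.take_append_drop pn arr]
    rw [hd1, List.getD_eq_getElem arr ' ' h1, List.getD_eq_getElem arr ' ' hjn]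
    congr 1
    congr 1
    conv_lhs => rw [← List.take_append_drop (jn - (pn+1)) (arr.drop (pn+1))]
    rw [hdd, hd2]
  · simp; omega
  · simp; omega

-- A's in-place swap + suffix reversal equals B's reassembled slices
theorem stepAssembly (arr : List Char) (pn jn : Nat) (hpj : pn < jn) (hjn : jn < arr.length) :
    ((arr.set pn (arr.getD jn ' ')).set jn (arr.getD pn ' ')).take (pn+1) ++
      (((arr.set pn (arr.getD jn ' ')).set jn (arr.getD pn ' ')).drop (pn+1)).reverse
    = arr.take pn ++ [arr.getD jn ' '] ++
      ((arr.drop (pn+1)).take (jn - (pn+1)) ++ [arr.getD pn ' '] ++ arr.drop (jn+1)).reverse := by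
  obtain ⟨u, v, w, heq, hu, hv⟩ := decompTwo arr pn jn hpj hjn
  set x := arr.getD pn ' ' with hx
  set y := arr.getD jn ' ' with hy
  subst hu
  have hjn' : jn = u.length + (v.length + 1) := by omega
  subst hjn'
  rw [heq]
  have e1 : u.length + (v.length + 1) + 1 - u.length = v.length + 2 := by omega
  have e2 : u.length + (v.length + 1) - (u.length + 1) = v.length := by omega
  have e3 : v.length + 2 = v.length + 1 + 1 := by omega
  simp [List.take_append, List.drop_append, e1, e2, e3,
    List.take_of_length_le, List.drop_eq_nil_of_le]
  omega

-- that reassembly is a rearrangement of arr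
theorem assemblyPerm (arr : List Char) (pn jn : Nat) (hpj : pn < jn) (hjn : jn < arr.length) :
    (arr.take pn ++ [arr.getD jn ' '] ++
      ((arr.drop (pn+1)).take (jn - (pn+1)) ++ [arr.getD pn ' '] ++ arr.drop (jn+1)).reverse).Perm
      arr := by
  obtain ⟨u, v, w, heq, hu, hv⟩ := decompTwo arr pn jn hpj hjn
  set x := arr.getD pn ' ' with hx
  set y := arr.getD jn ' ' with hy
  subst hu
  have hjn' : jn = u.length + (v.length + 1) := by omega
  subst hjn'
  rw [heq]
  have e2 : u.length + (v.length + 1) - (u.length + 1) = v.length := by omega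
  have e3 : u.length + (v.length + 1) + 1 = u.length + (v.length + 2) := by omega
  simp [List.drop_append, e2, e3, List.drop_eq_nil_of_le,
    List.perm_iff_count, List.count_append, List.count_cons]
  intro a
  ring

theorem nextPermA_eq_advB (arr : List Char) : nextPermA arr = (advB arr).getD arr := by
  simp only [nextPermA, advB, pivotB_eq_pivotA, jScanB_eq_jScanA]
  set i := pivotA arr ((arr.length:Int) - 2) with hidef
  by_cases hi0 : 0 ≤ i
  · have hspec := pivotA_spec arr ((arr.length:Int) - 2)
    rw [← hidef] at hspec
    have hile : i ≤ (arr.length:Int) - 2 := hspec.1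
    have hlt : PySem.List.pyGetD arr i ' ' < PySem.List.pyGetD arr (i+1) ' ' := hspec.2 hi0
    have hine : ¬ i = -1 := by omega
    have hin : ¬ i < 0 := by omega
    rw [if_neg hine, if_pos hi0, if_neg hin]
    set j := jScanA arr i ((arr.length:Int)-1) with hjdef
    obtain ⟨hj1, hj2, hj3⟩ := jScanA_spec arr i ((arr.length:Int)-1) hi0 (by omega) hlt
    rw [← hjdef] at hj1 hj2 hj3
    simp only [Option.getD_some]
    have hip : i = (i.toNat : Int) := by omega
    have hjp : j = (j.toNat : Int) := by omega
    set pn := i.toNat with hpn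
    set jn := j.toNat with hjn2
    have hpj : pn < jn := by omega
    have hjn : jn < arr.length := by omega
    rw [hip, hjp]
    have c1 : (pn:Int) + 1 = ((pn+1 : Nat):Int) := by push_cast; ring
    have c2 : (jn:Int) + 1 = ((jn+1 : Nat):Int) := by push_cast; ring
    rw [c1, c2]
    rw [PySem.List.pyGetD_natCast, PySem.List.pyGetD_natCast,
        PySem.List.pySetD_natCast, PySem.List.pySetD_natCast,
        PySem.List.slice_to_natCast, PySem.List.slice_from_natCast,
        PySem.List.slice_to_natCast, PySem.List.slice_from_natCast,
        PySem.List.slice_natCast]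
    exact stepAssembly arr pn jn hpj hjn
  · have hilt : i < 0 := by omega
    rw [if_pos hilt]
    split_ifs <;> rfl

theorem getD_advB_perm (arr : List Char) : ((advB arr).getD arr).Perm arr := by
  simp only [advB, pivotB_eq_pivotA, jScanB_eq_jScanA]
  set i := pivotA arr ((arr.length:Int) - 2) with hidef
  by_cases hi0 : 0 ≤ i
  · have hspec := pivotA_spec arr ((arr.length:Int) - 2)
    rw [← hidef] at hspec
    have hile : i ≤ (arr.length:Int) - 2 := hspec.1
    have hlt : PySem.List.pyGetD arr i ' ' < PySem.List.pyGetD arr (i+1) ' ' := hspec.2 hi0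
    have hin : ¬ i < 0 := by omega
    rw [if_neg hin]
    set j := jScanA arr i ((arr.length:Int)-1) with hjdef
    obtain ⟨hj1, hj2, hj3⟩ := jScanA_spec arr i ((arr.length:Int)-1) hi0 (by omega) hlt
    rw [← hjdef] at hj1 hj2 hj3
    simp only [Option.getD_some]
    have hip : i = (i.toNat : Int) := by omega
    have hjp : j = (j.toNat : Int) := by omega
    set pn := i.toNat with hpn
    set jn := j.toNat with hjn2
    have hpj : pn < jn := by omega
    have hjn : jn < arr.length := by omega
    rw [hip, hjp]
    have c1 : (pn:Int) + 1 = ((pn+1 : Nat):Int) := by push_cast; ring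
    have c2 : (jn:Int) + 1 = ((jn+1 : Nat):Int) := by push_cast; ring
    rw [c1, c2]
    rw [PySem.List.pyGetD_natCast, PySem.List.pyGetD_natCast,
        PySem.List.slice_to_natCast, PySem.List.slice_from_natCast,
        PySem.List.slice_natCast]
    exact assemblyPerm arr pn jn hpj hjn
  · have hilt : i < 0 := by omega
    rw [if_pos hilt]
    simp

theorem stepsA_fix (arr : List Char) (hfix : nextPermA arr = arr) :
    ∀ n, stepsA n arr = arr := by
  intro n
  induction n with
  | zero => rfl
  | succ n ih => rw [stepsA, hfix, ih]

theorem stepsB_eq_stepsA (n : Nat) : ∀ (arr : List Char), stepsB n arr = stepsA n arr := by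
  induction n with
  | zero => intro arr; rfl
  | succ n ih =>
    intro arr
    rw [stepsB, stepsA]
    cases hadv : advB arr with
    | none =>
      have hfix : nextPermA arr = arr := by rw [nextPermA_eq_advB, hadv]; rfl
      dsimp only
      rw [hfix, stepsA_fix arr hfix]
    | some a =>
      have hstep : nextPermA arr = a := by rw [nextPermA_eq_advB, hadv]; rfl
      dsimp only
      rw [hstep, ih]

theorem stepsA_perm (n : Nat) : ∀ (arr : List Char), (stepsA n arr).Perm arr := by
  induction n with
  | zero => intro arr; rfl
  | succ n ih =>
    intro arr
    rw [stepsA]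
    refine (ih (nextPermA arr)).trans ?_
    rw [nextPermA_eq_advB]
    exact getD_advB_perm arr

theorem countFindA_spec (s : List Char) (c : Char) : ∀ (j : Nat), c ∈ s.drop j →
    countFindA s c j = j + (s.drop j).idxOf c := by
  intro j
  induction hn : s.length - j generalizing j with
  | zero =>
    intro hc
    have : s.drop j = [] := List.drop_eq_nil_of_le (by omega)
    rw [this] at hc; simp at hc
  | succ n ih =>
    intro hc
    have hj : j < s.length := by
      by_contra h
      rw [List.drop_eq_nil_of_le (by omega)] at hc; simp at hc
    have hdrop : s.drop j = s[j] :: s.drop (j+1) := List.drop_eq_getElem_cons hj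
    rw [countFindA, dif_pos hj]
    by_cases he : s[j] = c
    · rw [if_pos he, hdrop, he]; simp
    · rw [if_neg he]
      have hc' : c ∈ s.drop (j+1) := by
        rw [hdrop] at hc; cases hc with
        | head => exact absurd rfl he
        | tail _ h => exact h
      rw [ih (j+1) (by omega) hc', hdrop, List.idxOf_cons]
      rw [show (s[j] == c) = false from beq_eq_false_iff_ne.mpr he]
      simp only [Bool.cond_false]
      omega

theorem bubbleA_spec (pre : List Char) : ∀ (idx : Nat) (rem : List Char) (swaps : Int),
    idx < rem.length →
    bubbleA pre.length (pre.length + idx) (pre ++ rem) swaps =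
      (pre ++ rem.getD idx ' ' :: rem.eraseIdx idx, swaps + idx) := by
  intro idx
  induction idx with
  | zero =>
    intro rem swaps h
    rw [bubbleA]
    rw [dif_neg (by omega)]
    cases rem with
    | nil => simp at h
    | cons a r => simp
  | succ idx ih =>
    intro rem swaps h
    obtain ⟨t, v, w, heq, ht, hv⟩ := decompTwo rem idx (idx+1) (by omega) h
    have hv0 : v = [] := List.eq_nil_of_length_eq_zero (by omega)
    subst hv0
    set a := rem.getD idx ' ' with ha
    set b := rem.getD (idx+1) ' ' with hb
    simp only [List.nil_append] at heq
    rw [bubbleA, dif_pos (by omega)]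
    have g1 : (pre ++ rem).getD (pre.length + (idx + 1) - 1) ' ' = a := by
      have e : pre.length + (idx+1) - 1 = pre.length + idx := by omega
      rw [e, ha]
      simp [List.getD, List.getElem?_append_right]
    have g2 : (pre ++ rem).getD (pre.length + (idx + 1)) ' ' = b := by
      rw [hb]
      simp [List.getD, List.getElem?_append_right]
    rw [g1, g2]
    have hset : ((pre ++ rem).set (pre.length + (idx+1)) a).set (pre.length + (idx+1) - 1) b
        = pre ++ (t ++ b :: a :: w) := by
      rw [heq, show pre ++ (t ++ a :: (b :: w)) = (pre ++ t) ++ a :: b :: w by simp]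
      have e1 : pre.length + (idx+1) = (pre ++ t).length + 1 := by
        simp only [List.length_append, ht]; omega
      rw [e1]
      have e4 : (pre ++ t).length + 1 - 1 = (pre ++ t).length := by omega
      rw [e4]
      rw [List.set_append_right _ _ (by omega), List.set_append_right _ _ (by omega)]
      simp
    rw [hset]
    have hlen2 : idx < (t ++ b :: a :: w).length := by
      simp; omega
    have e3 : pre.length + (idx+1) - 1 = pre.length + idx := by omega
    rw [e3, ih (t ++ b :: a :: w) (swaps + 1) hlen2]
    have r1 : (t ++ b :: a :: w).getD idx ' ' = b := by
      rw [← ht]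
      simp [List.getD]
    have r2 : (t ++ b :: a :: w).eraseIdx idx = t ++ a :: w := by
      rw [← ht]
      simpa using List.eraseIdx_append_of_length_le (le_refl t.length) (b :: a :: w)
    have r4 : rem.eraseIdx (idx+1) = t ++ a :: w := by
      rw [heq, show idx + 1 = t.length + 1 by omega]
      simpa using List.eraseIdx_append_of_length_le (by omega : t.length ≤ t.length + 1) (a :: b :: w)
    rw [r1, r2, r4]
    refine Prod.ext rfl ?_
    push_cast; ring

theorem index?_of_mem (c : Char) (rem : List Char) (h : c ∈ rem) :
    PySem.List.index? rem c = some (rem.idxOf c) := by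
  rw [PySem.List.index?_eq_idxOf?]
  simp only [List.idxOf?_eq_some_iff]
  refine ⟨List.idxOf_lt_length_of_mem h, List.getElem_idxOf _, fun j hj => ?_⟩
  have := List.not_of_lt_findIdx (p := (· == c)) (xs := rem) (by simpa [List.idxOf] using hj)
  simpa using this

-- A's bubble count from position |pre| on equals B's index/pop count on the suffixes
theorem countA_master (tgt : List Char) : ∀ (rem pre : List Char) (swaps : Int), tgt.Perm rem →
    countA (pre ++ tgt) rem.length (pre ++ rem) pre.length swaps = swaps + countB rem tgt := by
  induction tgt with
  | nil =>
    intro rem pre swaps hperm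
    have : rem = [] := hperm.symm.eq_nil
    subst this
    simp [countA, countB]
  | cons c tgt' ih =>
    intro rem pre swaps hperm
    have hcm : c ∈ rem := hperm.mem_iff.mp List.mem_cons_self
    cases rem with
    | nil => simp at hcm
    | cons r0 rem'' =>
    have hs : (pre ++ (r0 :: rem'')).getD pre.length ' ' = r0 := by
      simp [List.getD]
    have hk : (pre ++ (c :: tgt')).getD pre.length ' ' = c := by
      simp [List.getD]
    show countA (pre ++ (c :: tgt')) (rem''.length + 1) (pre ++ (r0 :: rem'')) pre.length swaps = _
    rw [countA]
    rw [hs, hk]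
    by_cases hr : r0 = c
    · rw [if_neg (by simp [hr])]
      subst hr
      have e1 : pre ++ (r0 :: rem'') = (pre ++ [r0]) ++ rem'' := by simp
      have e2 : pre ++ (r0 :: tgt') = (pre ++ [r0]) ++ tgt' := by simp
      have e3 : pre.length + 1 = (pre ++ [r0]).length := by simp
      rw [e1, e2, e3, ih rem'' (pre ++ [r0]) swaps hperm.cons_inv]
      rw [countB, index?_of_mem r0 (r0 :: rem'') List.mem_cons_self]
      simp [List.idxOf_cons_self]
    · rw [if_pos (by simp [hr])]
      set rem : List Char := r0 :: rem'' with hremdef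
      set idx := rem.idxOf c with hidx
      have hidxlt : idx < rem.length := List.idxOf_lt_length_of_mem hcm
      have hfind : countFindA (pre ++ rem) c pre.length = pre.length + idx := by
        rw [countFindA_spec (pre ++ rem) c pre.length (by simpa using hcm)]
        simp [hidx]
      dsimp only
      rw [hfind, bubbleA_spec pre idx rem swaps hidxlt]
      have hget : rem.getD idx ' ' = c := by
        rw [List.getD_eq_getElem _ _ hidxlt]
        exact List.getElem_idxOf hidxlt
      rw [hget]
      have hlen : rem''.length = (rem.eraseIdx idx).length := by
        rw [List.length_eraseIdx_of_lt hidxlt]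
        simp [hremdef]
      have e1 : pre ++ c :: rem.eraseIdx idx = (pre ++ [c]) ++ rem.eraseIdx idx := by simp
      have e2 : pre ++ (c :: tgt') = (pre ++ [c]) ++ tgt' := by simp
      have e3 : pre.length + 1 = (pre ++ [c]).length := by simp
      have hperm' : tgt'.Perm (rem.eraseIdx idx) := by
        have h1 : rem.Perm (c :: rem.erase c) := List.perm_cons_erase hcm
        have h2 : rem.erase c = rem.eraseIdx idx := List.erase_eq_eraseIdx_of_idxOf rfl
        rw [h2] at h1
        exact (hperm.trans h1).cons_inv
      rw [hlen, e1, e2, e3, ih (rem.eraseIdx idx) (pre ++ [c]) (swaps + idx) hperm']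
      rw [countB, index?_of_mem c rem hcm, ← hidx]
      ring

-- stripping a common prefix does not change the index/pop count
theorem countB_strip (p : List Char) : ∀ (s t : List Char), countB (p ++ s) (p ++ t) = countB s t := by
  induction p with
  | nil => intro s t; rfl
  | cons x p' ih =>
    intro s t
    show countB (x :: (p' ++ s)) (x :: (p' ++ t)) = countB s t
    rw [countB, PySem.List.index?_cons_self]
    simpa using ih s t

theorem prefLenB_spec (src arr : List Char) : ∀ (m0 : Nat), m0 ≤ arr.length →
    m0 ≤ prefLenB src arr m0 ∧ prefLenB src arr m0 ≤ arr.length ∧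
      (∀ i, m0 ≤ i → i < prefLenB src arr m0 → src.getD i ' ' = arr.getD i ' ') := by
  intro m0
  induction hn : arr.length - m0 generalizing m0 with
  | zero =>
    intro hm0
    rw [prefLenB]
    rw [dif_neg (by omega)]
    exact ⟨le_refl _, hm0, fun i h1 h2 => absurd h2 (by omega)⟩
  | succ n ih =>
    intro hm0
    rw [prefLenB]
    split_ifs with hc
    · obtain ⟨g1, g2, g3⟩ := ih (m0 + 1) (by omega) (by omega)
      refine ⟨by omega, g2, fun i h1 h2 => ?_⟩
      by_cases he : i = m0
      · subst he; exact hc.2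
      · exact g3 i (by omega) h2
    · exact ⟨le_refl _, hm0, fun i h1 h2 => absurd h2 (by omega)⟩

theorem alt_empty : getMinSwaps_alt "" 1 = 0 := by
  have hpiv : pivotB ([] : List Char) (-2) = -2 := by
    rw [pivotB, dif_neg (by rintro ⟨h, -⟩; omega)]
  have hadv : advB ([] : List Char) = none := by
    simp [advB, hpiv]
  have hstep : stepsB 1 ([] : List Char) = [] := by
    rw [stepsB, hadv]
  have hpl : prefLenB ([] : List Char) [] 0 = 0 := by
    rw [prefLenB, dif_neg (by rintro ⟨h, -⟩; simp at h)]
  show getMinSwaps_alt "" 1 = 0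
  simp [getMinSwaps_alt, hstep, hpl, countB]

-- ===== VERDICT (by name: the statement is the Claim_ definition above) =====
theorem getMinSwaps_spec : Claim_equal_getMinSwaps := by
  intro num k _hdom _hpre
  unfold Spec_getMinSwaps getMinSwaps getMinSwaps_alt
  dsimp only
  set L := num.toList with hL
  have hroundtrip : (String.ofList (stepsA k.toNat L)).toList = stepsA k.toNat L := by simp
  rw [hroundtrip, stepsB_eq_stepsA]
  set kth := stepsA k.toNat L with hkth
  have hperm : kth.Perm L := stepsA_perm k.toNat L
  have hlen : kth.length = L.length := hperm.length_eq
  -- A's count is B's count on the full lists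
  have hA : countA kth L.length L 0 0 = countB L kth := by
    have := countA_master kth L [] 0 hperm
    simpa using this
  -- B strips the common prefix first; that does not change the count
  set m := prefLenB L kth 0 with hm
  obtain ⟨-, hmlen, hpt⟩ := prefLenB_spec L kth 0 (by omega)
  have htake : L.take m = kth.take m := by
    apply List.ext_getElem
    · simp; omega
    · intro i h1 h2
      have hi : i < m := by simp at h1; omega
      have hgd := hpt i (by omega) (by rw [← hm]; exact hi)
      rw [List.getD_eq_getElem _ _ (by omega), List.getD_eq_getElem _ _ (by omega)] at hgd
      simpa using hgd
  have hB : countB (L.drop m) (kth.drop m) = countB L kth := by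
    conv_rhs => rw [← List.take_append_drop m L, ← List.take_append_drop m kth]
    rw [← htake, countB_strip]
  rw [hA, ← hB]

-- (def, not theorem: its statement is the Claim_ above, consumed by the grader by name)
def getMinSwaps_raises : Claim_raises_getMinSwaps := by
  unfold Claim_raises_getMinSwaps
  constructor
  · intro num k _ hr
    unfold Raises_getMinSwaps at hr
    unfold Pre_getMinSwaps
    rintro (hne | hle)
    · exact hne hr.1
    · omega
  · exact ⟨by decide, by constructor <;> decide, alt_empty⟩
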